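-- pv_equiv track=rewrite | github.com/TTMK7777/player-list-scraper | core/investigation_templates.py | import_from_text
-- ===== SOURCE A (Python) =====
-- def import_from_text(
--     text: str, separator: str = ","
-- ) -> list[str]:
--     """テキストから属性リストを抽出する。
--
--     カンマ・改行・指定セパレータで分割し、空白をトリミング。
--
--     Args:
--         text: 属性が含まれたテキスト。
--         separator: 区切り文字（デフォルト: カンマ）。
--
--     Returns:
--         属性文字列のリスト（空文字列は除外）。
--     """
--     # 改行で分割してからセパレータで分割
--     items = []
--     for line in text.splitlines():
--         for item in line.split(separator):
--             stripped = item.strip()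
--             if stripped:
--                 items.append(stripped)
--     return items
-- ===== SOURCE B (Python) =====
-- def import_from_text(
--     text: str, separator: str = ","
-- ) -> list[str]:
--     """Per-line scanner: instead of list-building split()+strip()+filter,
--     scan each line once and emit stripped tokens in place at each
--     separator occurrence."""
--     if not separator:
--         raise ValueError("empty separator")
--     items = []
--     m = len(separator)
--     for line in text.splitlines():
--         n = len(line)
--         start = i = 0
--         while i < n:
--             if line.startswith(separator, i):
--                 tok = line[start:i].strip()
--                 if tok:
--                     items.append(tok)
--                 i += m
--                 start = i
--             else:
--                 i += 1
--         tok = line[start:].strip()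
--         if tok:
--             items.append(tok)
--     return items
-- ===== Notes on version B (the rewrite author's own statement) =====
-- stated objective: alternative
-- what changed: A builds intermediate lists per line (split by the separator, then strip each part, then filter); B replaces that pipeline by a single in-place scanner over each line that emits a stripped token at each separator occurrence, with no intermediate lists; Pre_ excludes the empty separator, on which A raises ValueError from line.split('') whenever text has a line (and B raises up front), the sole returning excluded inputs pairing the empty separator with a text that has no lines, where A's loop body never runs.
-- outside the precondition, e.g. on import_from_text('', ''): A returns [], B raises ValueError; on import_from_text('a,b', ''): A raises ValueError, B raises ValueError
import Mathlib
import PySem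

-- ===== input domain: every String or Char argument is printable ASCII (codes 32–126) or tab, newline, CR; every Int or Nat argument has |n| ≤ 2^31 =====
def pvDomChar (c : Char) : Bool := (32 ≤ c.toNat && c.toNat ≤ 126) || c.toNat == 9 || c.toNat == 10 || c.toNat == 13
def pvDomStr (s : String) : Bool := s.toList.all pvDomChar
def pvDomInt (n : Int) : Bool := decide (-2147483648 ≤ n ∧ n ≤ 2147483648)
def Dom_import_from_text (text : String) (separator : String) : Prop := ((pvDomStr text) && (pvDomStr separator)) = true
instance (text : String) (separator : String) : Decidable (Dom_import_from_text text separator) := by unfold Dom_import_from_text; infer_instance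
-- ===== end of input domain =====

-- B replaces A's per-line split → strip-each → filter pipeline by a single in-place
-- scanner over each line that emits a stripped token at each separator occurrence
-- (alternative decomposition, same cost); Pre_ excludes the empty separator, on which
-- A raises ValueError from line.split("") whenever the text has a line and B raises up
-- front (the sole excluded kind of
-- input where A returns is a text with no lines together with the empty separator).


-- ===== PORT A =====
def import_from_text (text : String) (separator : String) : List String :=
  (PySem.Str.splitlines text).foldl
    (fun items line =>
      match PySem.Str.split? line separator with
      | none => items            -- line.split("") raises ValueError (outside Pre_)
      | some parts =>
          parts.foldl
            (fun items item =>
              let stripped := PySem.Str.strip item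
              if stripped ≠ "" then items ++ [stripped] else items)
            items)
    []

-- ===== PORT B =====
-- 'tok = line[start:i].strip(); if tok: items.append(tok)'
def pvEmit (cur : List Char) : List String :=
  let tok := PySem.Chars.strip cur
  if tok.isEmpty then [] else [String.ofList tok]

-- Source B's while-loop over one line: `cur` is line[start:i], the third argument is the
-- rest of the line from position i on; fuel counts the remaining loop steps (every
-- step consumes at least one character, so fuel := |line| never runs out and the
-- fuel-0 arm is unreachable).
def pvLineScan (sep : List Char) : Nat → List Char → List Char → List String
  | _, cur, [] => pvEmit cur
  | 0, _, _ :: _ => []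
  | fuel + 1, cur, c :: r =>
    if sep.isPrefixOf (c :: r) then
      pvEmit cur ++ pvLineScan sep fuel [] (List.drop sep.length (c :: r))
    else
      pvLineScan sep fuel (cur ++ [c]) r

def import_from_text_alt (text : String) (separator : String) : List String :=
  if separator.toList = [] then []   -- Source B raises ValueError("empty separator") here; outside Pre_
  else
    (PySem.Str.splitlines text).foldl
      (fun items line => items ++ pvLineScan separator.toList line.toList.length [] line.toList)
      []

-- ===== PRECONDITION & SPEC =====
-- Pre_ excludes the empty separator: there A raises ValueError from line.split("")
-- whenever the text has a line, and B raises ValueError up front (the sole excluded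
-- kind of input on which A returns is a text with no lines together with the empty separator).
def Pre_import_from_text (text : String) (separator : String) : Prop :=
  separator.toList ≠ []
instance (text : String) (separator : String) : Decidable (Pre_import_from_text text separator) := by
  unfold Pre_import_from_text; infer_instance

def pvWitness_import_from_text : String × String := ("alice, bob\ncarol ,, dave\r\n eve", ",")

def Spec_import_from_text (text : String) (separator : String) (out : List String) : Prop :=
  out = import_from_text_alt text separator
instance (text : String) (separator : String) (out : List String) : Decidable (Spec_import_from_text text separator out) := by
  unfold Spec_import_from_text; infer_instance

-- ===== CLAIM (what is proved, stated in full; the proofs are below) =====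
def Claim_equal_import_from_text : Prop :=
  ∀ (text : String) (separator : String), Dom_import_from_text text separator →
    Pre_import_from_text text separator →
    Spec_import_from_text text separator (import_from_text text separator)

-- ===== LEMMAS AND PROOFS =====

-- accumulator-free form of PySem.Chars.splitOn.go (cur is the reversed pending piece)
def pvSP (sep : List Char) (hsep : sep ≠ []) (cur : List Char) : List Char → List (List Char)
  | [] => [cur.reverse]
  | c :: r =>
    if sep.isPrefixOf (c :: r) then
      cur.reverse :: pvSP sep hsep [] (List.drop sep.length (c :: r))
    else pvSP sep hsep (c :: cur) r
termination_by l => l.length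
decreasing_by
  · have := List.length_pos_of_ne_nil hsep
    simp only [List.length_drop, List.length_cons]; omega
  · simp

lemma pvSP_spec (sep : List Char) (hsep : sep ≠ []) :
    ∀ (fuel : Nat) (l cur : List Char) (acc : List (List Char)), l.length < fuel →
      PySem.Chars.splitOn.go sep fuel l cur acc = acc.reverse ++ pvSP sep hsep cur l := by
  intro fuel
  induction fuel with
  | zero => intro l cur acc h; omega
  | succ fuel ih =>
    intro l cur acc h
    rcases l with _ | ⟨c, r⟩
    · rw [PySem.Chars.splitOn.go.eq_def, pvSP]
      simp
    · rw [PySem.Chars.splitOn.go.eq_def]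
      simp only []
      rw [pvSP]
      by_cases hp : sep.isPrefixOf (c :: r) = true
      · have hlen := List.length_pos_of_ne_nil hsep
        rw [if_pos hp, if_pos hp, ih _ [] _ (by simp at h ⊢; omega)]
        simp
      · rw [if_neg hp, if_neg hp, ih r (c :: cur) _ (by simp at h; omega)]

lemma pvSplitOn_eq (sep : List Char) (hsep : sep ≠ []) (l : List Char) :
    PySem.Chars.splitOn l sep = pvSP sep hsep [] l := by
  have h : PySem.Chars.splitOn l sep = PySem.Chars.splitOn.go sep (l.length + 1) l [] [] := rfl
  rw [h, pvSP_spec sep hsep _ _ _ _ (by omega)]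
  simp

-- THE CRUX per line: split, then strip-and-filter, equals the in-place scanner
lemma pvLineCrux (sep : List Char) (hsep : sep ≠ []) :
    ∀ (fuel : Nat) (t p : List Char), t.length ≤ fuel →
      (pvSP sep hsep p.reverse t).flatMap pvEmit = pvLineScan sep fuel p t := by
  intro fuel
  induction fuel with
  | zero =>
    intro t p hf
    have : t = [] := List.eq_nil_of_length_eq_zero (Nat.le_zero.mp hf)
    subst this
    rw [pvSP, pvLineScan]
    simp
  | succ fuel ih =>
    intro t p hf
    rcases t with _ | ⟨c, r⟩
    · rw [pvSP, pvLineScan]; simp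
    · rw [pvSP, pvLineScan]
      by_cases hp : sep.isPrefixOf (c :: r) = true
      · have hlen := List.length_pos_of_ne_nil hsep
        rw [if_pos hp, if_pos hp, List.flatMap_cons, List.reverse_reverse,
            ← ih (List.drop sep.length (c :: r)) []
              (by simp only [List.length_drop, List.length_cons] at *; omega)]
        rfl
      · rw [if_neg hp, if_neg hp,
            show c :: p.reverse = (p ++ [c]).reverse by simp,
            ih r (p ++ [c]) (by simp at hf; omega)]

-- A's fold pipeline in flatMap form
lemma pvA_shape (text separator : String) (h : separator.toList ≠ []) :
    import_from_text text separator
      = ((PySem.Chars.splitlines text.toList).flatMap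
          (fun l => PySem.Chars.splitOn l separator.toList)).flatMap pvEmit := by
  unfold import_from_text
  rw [show PySem.Str.splitlines text = (PySem.Chars.splitlines text.toList).map String.ofList from rfl]
  rw [List.foldl_map]
  have hsplit : ∀ l : List Char,
      PySem.Str.split? (String.ofList l) separator
        = some ((PySem.Chars.splitOn l separator.toList).map String.ofList) := by
    intro l
    show Option.map _ (PySem.Chars.split? (String.ofList l).toList separator.toList) = _
    rw [String.toList_ofList]
    unfold PySem.Chars.split?
    rw [if_neg (by simpa using h)]
    rfl
  have hstep : ∀ (items : List String) (l : List Char),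
      (match PySem.Str.split? (String.ofList l) separator with
       | none => items
       | some parts =>
           parts.foldl
             (fun items item =>
               let stripped := PySem.Str.strip item
               if stripped ≠ "" then items ++ [stripped] else items)
             items)
        = items ++ (PySem.Chars.splitOn l separator.toList).flatMap pvEmit := by
    intro items l
    rw [hsplit l]
    simp only
    rw [List.foldl_map]
    have hfun : (fun (items : List String) (lc : List Char) =>
        let stripped := PySem.Str.strip (String.ofList lc)
        if stripped ≠ "" then items ++ [stripped] else items)
        = (fun items lc => items ++ pvEmit lc) := by
      funext items lc
      have hs : PySem.Str.strip (String.ofList lc) = String.ofList (PySem.Chars.strip lc) := by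
        conv_lhs => rw [← @String.ofList_toList (PySem.Str.strip (String.ofList lc))]
        rw [PySem.Str.toList_strip, String.toList_ofList]
      simp only [hs, pvEmit]
      by_cases he : PySem.Chars.strip lc = []
      · rw [he]
        simp [show String.ofList [] = "" from rfl]
      · rw [if_pos (by
            simp only [ne_eq]
            intro hc
            exact he (by simpa using congrArg String.toList hc)),
          if_neg (by simpa using he)]
    rw [hfun, PySem.List.foldl_append_eq_flatMap]
  simp only [hstep]
  rw [PySem.List.foldl_append_eq_flatMap, List.flatMap_assoc]
  simp

-- ===== VERDICT (by name: the statement is the Claim_ definition above) =====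
theorem import_from_text_spec : Claim_equal_import_from_text := by
  intro text separator _hdom hpre
  unfold Spec_import_from_text
  have hsep : separator.toList ≠ [] := hpre
  rw [pvA_shape text separator hsep]
  unfold import_from_text_alt
  rw [if_neg hsep]
  rw [show PySem.Str.splitlines text = (PySem.Chars.splitlines text.toList).map String.ofList from rfl,
      List.foldl_map]
  have hstep : ∀ (items : List String) (l : List Char),
      items ++ pvLineScan separator.toList (String.ofList l).toList.length [] (String.ofList l).toList
        = items ++ pvLineScan separator.toList l.length [] l := by
    intro items l; rw [String.toList_ofList]
  simp only [hstep]
  rw [PySem.List.foldl_append_eq_flatMap, List.flatMap_assoc]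
  refine congrArg (List.flatMap · _) (funext fun l => ?_)
  rw [pvSplitOn_eq separator.toList hsep l,
      ← pvLineCrux separator.toList hsep l.length l [] (le_refl _)]
  rfl
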